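-- pv_equiv track=rewrite | github.com/siqili723547-ui/rag | retrieve_sections.py | iter_opening_lines
-- ===== SOURCE A (Python) =====
-- from typing import Iterable
--
-- def iter_opening_lines(content: str) -> Iterable[str]:
--     lines = [line.strip() for line in content.splitlines() if line.strip()]
--     heading_count = 0
--
--     for line in lines:
--         if line.startswith("## "):
--             heading_count += 1
--             if heading_count >= 2:
--                 break
--
--         yield line
-- ===== SOURCE B (Python) =====
-- def iter_opening_lines(content):
--     stripped = [s for s in (line.strip() for line in content.splitlines()) if s]
--     heads = [i for i, s in enumerate(stripped) if s.startswith("## ")]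
--     cut = heads[1] if len(heads) >= 2 else len(stripped)
--     yield from stripped[:cut]
-- ===== Notes on version B (the rewrite author's own statement) =====
-- stated objective: alternative
-- what changed: B replaces A's streaming loop with a running heading counter and early break by an index-then-slice decomposition: it collects the positions of second-level markdown headings once and emits the computed prefix slice up to the second heading.
import Mathlib
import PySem

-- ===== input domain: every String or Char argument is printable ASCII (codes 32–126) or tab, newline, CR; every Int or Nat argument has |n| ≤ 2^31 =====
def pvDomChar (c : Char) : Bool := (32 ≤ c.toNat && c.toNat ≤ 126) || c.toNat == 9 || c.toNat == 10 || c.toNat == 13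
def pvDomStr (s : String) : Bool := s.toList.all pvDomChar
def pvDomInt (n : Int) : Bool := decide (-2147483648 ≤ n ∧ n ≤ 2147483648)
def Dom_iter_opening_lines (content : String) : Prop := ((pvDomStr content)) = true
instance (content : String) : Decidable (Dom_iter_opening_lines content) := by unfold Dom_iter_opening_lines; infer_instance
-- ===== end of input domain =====

-- B replaces A's streaming loop (running heading counter, early break) by an index-then-slice
-- decomposition: collect the heading positions once, then emit the prefix up to the second one.

-- ===== PORT A =====
-- shared transliteration of the test `line.startswith("## ")`
def pvP (l : String) : Bool := PySem.Str.startswith l "## "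

-- the for-loop with heading_count and break/yield, as structural recursion over the lines
def pvGoA : List String → Nat → List String
  | [], _ => []
  | l :: rest, hc =>
    if pvP l then
      if hc + 1 ≥ 2 then [] else l :: pvGoA rest (hc + 1)
    else l :: pvGoA rest hc

def iter_opening_lines (content : String) : List String :=
  let lines := (PySem.Str.splitlines content).filterMap
    (fun line => if PySem.Str.strip line ≠ "" then some (PySem.Str.strip line) else none)
  pvGoA lines 0

-- ===== PORT B =====
def iter_opening_lines_alt (content : String) : List String :=
  let stripped := ((PySem.Str.splitlines content).map PySem.Str.strip).filter (fun s => s ≠ "")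
  let heads := (PySem.List.enumerate stripped 0).filterMap
    (fun p => if pvP p.2 then some p.1 else none)
  let cut : Int := if heads.length ≥ 2 then heads[1]! else (stripped.length : Int)
  PySem.List.slice stripped none (some cut)

-- ===== PRECONDITION & SPEC =====
def Spec_iter_opening_lines (content : String) (out : List String) : Prop := out = iter_opening_lines_alt content
instance (content : String) (out : List String) : Decidable (Spec_iter_opening_lines content out) := by unfold Spec_iter_opening_lines; infer_instance

-- ===== CLAIM (what is proved, stated in full; the proofs are below) =====
def Claim_equal_iter_opening_lines : Prop := ∀ (content : String), Dom_iter_opening_lines content → Spec_iter_opening_lines content (iter_opening_lines content)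

-- ===== LEMMAS AND PROOFS =====

-- heading positions (as Nats, relative to the front of the list)
def pvIdxs : List String → List Nat
  | [] => []
  | l :: rest =>
    if pvP l then 0 :: (pvIdxs rest).map (· + 1)
    else (pvIdxs rest).map (· + 1)

def pvCutN (ls : List String) : Nat :=
  match pvIdxs ls with
  | _ :: j :: _ => j
  | _ => ls.length

theorem pvGoA_one (ls : List String) :
    pvGoA ls 1 = ls.takeWhile (fun l => !pvP l) := by
  induction ls with
  | nil => rfl
  | cons l rest ih =>
    cases hP : pvP l <;> simp [pvGoA, List.takeWhile_cons, hP, ih]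

theorem takeWhile_eq_take_head (ls : List String) :
    ls.takeWhile (fun l => !pvP l) =
      ls.take (match pvIdxs ls with | j :: _ => j | [] => ls.length) := by
  induction ls with
  | nil => rfl
  | cons l rest ih =>
    cases hP : pvP l with
    | true => simp [List.takeWhile_cons, pvIdxs, hP]
    | false =>
      cases hr : pvIdxs rest with
      | nil =>
        rw [hr] at ih
        simp [List.takeWhile_cons, pvIdxs, hP, hr, ih]
      | cons j t =>
        rw [hr] at ih
        simp [List.takeWhile_cons, pvIdxs, hP, hr, ih]

theorem pvGoA_zero_eq_take (ls : List String) : pvGoA ls 0 = ls.take (pvCutN ls) := by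
  induction ls with
  | nil => rfl
  | cons l rest ih =>
    cases hP : pvP l with
    | true =>
      rw [show pvGoA (l :: rest) 0 = l :: pvGoA rest 1 by simp [pvGoA, hP]]
      rw [pvGoA_one, takeWhile_eq_take_head]
      cases hr : pvIdxs rest with
      | nil => simp [pvCutN, pvIdxs, hP, hr]
      | cons j t => simp [pvCutN, pvIdxs, hP, hr]
    | false =>
      rw [show pvGoA (l :: rest) 0 = l :: pvGoA rest 0 by simp [pvGoA, hP], ih]
      cases hr : pvIdxs rest with
      | nil => simp [pvCutN, pvIdxs, hP, hr]
      | cons j t =>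
        cases t with
        | nil => simp [pvCutN, pvIdxs, hP, hr]
        | cons j2 t2 => simp [pvCutN, pvIdxs, hP, hr]

-- B's heads list is pvIdxs shifted by the enumerate start
theorem heads_eq (ls : List String) (s : Int) :
    (PySem.List.enumerate ls s).filterMap
        (fun p => if pvP p.2 then some p.1 else none) =
      (pvIdxs ls).map (fun n : Nat => s + (n : Int)) := by
  induction ls generalizing s with
  | nil => simp only [PySem.List.enumerate_nil, List.filterMap_nil, pvIdxs, List.map_nil]
  | cons l rest ih =>
    rw [PySem.List.enumerate_cons]
    have hmap : ((pvIdxs rest).map (· + 1)).map (fun n : Nat => s + (n : Int)) =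
        (pvIdxs rest).map (fun n : Nat => (s + 1) + (n : Int)) := by
      rw [List.map_map]
      exact List.map_congr_left (fun n _ => by simp only [Function.comp_apply]; push_cast; ring)
    cases hP : pvP l with
    | true =>
      rw [List.filterMap_cons]
      simp only [hP, if_true, ih (s + 1), pvIdxs, List.map_cons, Int.natCast_zero, add_zero,
        hmap]
    | false =>
      rw [List.filterMap_cons]
      simp only [hP, Bool.false_eq_true, if_false, ih (s + 1), pvIdxs, hmap]

theorem alt_eq_take (content : String) :
    iter_opening_lines_alt content =
      (((PySem.Str.splitlines content).map PySem.Str.strip).filter (fun s => s ≠ "")).take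
        (pvCutN (((PySem.Str.splitlines content).map PySem.Str.strip).filter (fun s => s ≠ ""))) := by
  unfold iter_opening_lines_alt
  dsimp only
  set ls := ((PySem.Str.splitlines content).map PySem.Str.strip).filter (fun s => s ≠ "") with hls
  rw [heads_eq ls 0]
  have hz : (fun n : Nat => (0 : Int) + (n : Int)) = (fun n : Nat => (n : Int)) := by
    funext n; ring
  rw [hz]
  cases hr : pvIdxs ls with
  | nil =>
    rw [if_neg (by simp), PySem.List.slice_to_natCast]
    simp [pvCutN, hr]
  | cons j t =>
    cases t with
    | nil =>
      rw [if_neg (by simp), PySem.List.slice_to_natCast]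
      simp [pvCutN, hr]
    | cons j2 t2 =>
      rw [if_pos (by simp)]
      have hget : ((j :: j2 :: t2).map (fun n : Nat => (n : Int)))[1]! = ((j2 : Nat) : Int) := by
        simp
      rw [hget, PySem.List.slice_to_natCast]
      simp [pvCutN, hr]

theorem filterMap_strip_eq (xs : List String) :
    xs.filterMap (fun line => if PySem.Str.strip line ≠ "" then some (PySem.Str.strip line) else none) =
      (xs.map PySem.Str.strip).filter (fun s => s ≠ "") := by
  induction xs with
  | nil => rfl
  | cons x rest ih =>
    rw [List.filterMap_cons, List.map_cons, List.filter_cons]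
    by_cases h : PySem.Str.strip x = ""
    · rw [if_neg (by simp [h]), if_neg (by simp [h]), ih]
    · rw [if_pos (by simp [h]), if_pos (by simp [h]), ih]

-- ===== VERDICT (by name: the statement is the Claim_ definition above) =====
theorem iter_opening_lines_spec : Claim_equal_iter_opening_lines := by
  intro content _
  unfold Spec_iter_opening_lines iter_opening_lines
  rw [filterMap_strip_eq, alt_eq_take, pvGoA_zero_eq_take]
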